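-- pv_equiv track=rewrite | github.com/ibalram/Programming-Library | CP/CF/Deltix_Round_summer21_alt/amazon_1.py | solve
-- ===== SOURCE A (Python) =====
-- from heapq import heappop, heappush, heapify
--
-- def solve(N, Arr):
--     heap = []
--     for v,x,y in Arr:
--         heap.append((x*x+y*y,-v,x,y))
--     heapify(heap)
--     while len(heap)>1:
--         a = heappop(heap)
--         b = heappop(heap)
--         x = a[2]-b[2]
--         y = a[3]-b[3]
--         heappush(heap, (x*x+y*y, a[0]+b[0], x,y))
--     return heap[0][2:]
-- ===== SOURCE B (Python) =====
-- def _insert_sorted(xs, t):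
--     i = 0
--     while i < len(xs) and xs[i] < t:
--         i += 1
--     xs.insert(i, t)
--
-- def solve(N, Arr):
--     pts = []
--     for v, x, y in Arr:
--         _insert_sorted(pts, (x * x + y * y, -v, x, y))
--     while len(pts) > 1:
--         a, b = pts[0], pts[1]
--         pts = pts[2:]
--         x = a[2] - b[2]
--         y = a[3] - b[3]
--         _insert_sorted(pts, (x * x + y * y, a[0] + b[0], x, y))
--     return pts[0][2:]
-- ===== Notes on version B (the rewrite author's own statement) =====
-- stated objective: alternative
-- what changed: Replaces the binary heap with a list kept in ascending sorted order by ordered insertion, so each merge step takes the first two elements of the list instead of two heappops.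
import Mathlib
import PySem

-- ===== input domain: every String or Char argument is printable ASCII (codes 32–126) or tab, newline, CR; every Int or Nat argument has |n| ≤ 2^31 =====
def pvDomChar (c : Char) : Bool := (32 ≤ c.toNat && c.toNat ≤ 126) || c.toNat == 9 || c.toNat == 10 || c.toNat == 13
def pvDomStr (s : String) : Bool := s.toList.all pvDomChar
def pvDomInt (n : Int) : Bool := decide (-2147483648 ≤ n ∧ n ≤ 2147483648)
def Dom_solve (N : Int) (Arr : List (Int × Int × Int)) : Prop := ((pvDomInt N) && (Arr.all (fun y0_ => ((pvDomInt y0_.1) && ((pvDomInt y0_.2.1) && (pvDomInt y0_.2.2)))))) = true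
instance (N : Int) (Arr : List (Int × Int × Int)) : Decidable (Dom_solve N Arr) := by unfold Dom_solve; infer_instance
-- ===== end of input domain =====

-- B replaces A's binary heap by a list kept in ascending sorted order via ordered insertion
-- (each merge takes the first two elements); same merge sequence and result, no speed claim.

-- Python's `<` on the 4-tuples (dist, -v, x, y): lexicographic comparison of Ints.
def ltB (a b : Int × Int × Int × Int) : Bool :=
  if a.1 < b.1 then true else if b.1 < a.1 then false
  else if a.2.1 < b.2.1 then true else if b.2.1 < a.2.1 then false
  else if a.2.2.1 < b.2.2.1 then true else if b.2.2.1 < a.2.2.1 then false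
  else decide (a.2.2.2 < b.2.2.2)

-- the tuple (x*x+y*y, -v, x, y) both programs build from an input triple (v, x, y)
def keyOf (p : Int × Int × Int) : Int × Int × Int × Int :=
  (p.2.1 * p.2.1 + p.2.2 * p.2.2, -p.1, p.2.1, p.2.2)

-- the merged tuple (x*x+y*y, a[0]+b[0], x, y) both programs push
def combine (a b : Int × Int × Int × Int) : Int × Int × Int × Int :=
  ((a.2.2.1 - b.2.2.1) * (a.2.2.1 - b.2.2.1) + (a.2.2.2 - b.2.2.2) * (a.2.2.2 - b.2.2.2),
   a.1 + b.1, a.2.2.1 - b.2.2.1, a.2.2.2 - b.2.2.2)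

-- ===== PORT A =====
-- heapq is a library; its contract is min-extraction by tuple order, ported here as
-- "scan for the minimum, remove its first occurrence" (exact: tied tuples are equal values).
def minOf (x : Int × Int × Int × Int) (xs : List (Int × Int × Int × Int)) :
    Int × Int × Int × Int :=
  xs.foldl (fun m y => if ltB y m then y else m) x

-- the while loop; fuel is only a totality guard (the length decreases by 1 each iteration)
def loopA : Nat → List (Int × Int × Int × Int) → List (Int × Int × Int × Int)
  | 0, h => h
  | _ + 1, [] => []
  | _ + 1, [t] => [t]
  | fuel + 1, x :: x' :: xs =>
    match (x :: x' :: xs).erase (minOf x (x' :: xs)) with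
    | [] => []  -- unreachable: the heap had ≥ 2 elements
    | y :: ys =>
      loopA fuel (((y :: ys).erase (minOf y ys)) ++ [combine (minOf x (x' :: xs)) (minOf y ys)])

def solve (N : Int) (Arr : List (Int × Int × Int)) : Int × Int :=
  let heap := Arr.foldl (fun h p => h ++ [keyOf p]) []
  match loopA heap.length heap with
  | t :: _ => (t.2.2.1, t.2.2.2)
  | [] => (0, 0)  -- Python raises IndexError here (Arr = []); excluded by Pre_solve

-- ===== PORT B =====
-- _insert_sorted: insert t before the first element not < t
def insSorted (t : Int × Int × Int × Int) :
    List (Int × Int × Int × Int) → List (Int × Int × Int × Int)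
  | [] => [t]
  | x :: xs => if ltB x t then x :: insSorted t xs else t :: x :: xs

def loopB : Nat → List (Int × Int × Int × Int) → List (Int × Int × Int × Int)
  | 0, h => h
  | _ + 1, [] => []
  | _ + 1, [t] => [t]
  | fuel + 1, p :: q :: rest => loopB fuel (insSorted (combine p q) rest)

def solve_alt (N : Int) (Arr : List (Int × Int × Int)) : Int × Int :=
  let pts := Arr.foldl (fun h p => insSorted (keyOf p) h) []
  match loopB pts.length pts with
  | t :: _ => (t.2.2.1, t.2.2.2)
  | [] => (0, 0)  -- Python raises IndexError here (Arr = []); excluded by Pre_solve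

-- ===== PRECONDITION & SPEC =====
-- On Arr = [] both Pythons raise IndexError (heap[0] / pts[0]); nothing else is excluded.
def Pre_solve (N : Int) (Arr : List (Int × Int × Int)) : Prop := Arr ≠ []
instance (N : Int) (Arr : List (Int × Int × Int)) : Decidable (Pre_solve N Arr) := by
  unfold Pre_solve; infer_instance
def pvWitness_solve : Int × (List (Int × Int × Int)) := (2, [(1, 1, 2), (3, -1, 0)])

def Spec_solve (N : Int) (Arr : List (Int × Int × Int)) (out : Int × Int) : Prop := out = solve_alt N Arr
instance (N : Int) (Arr : List (Int × Int × Int)) (out : Int × Int) : Decidable (Spec_solve N Arr out) := by unfold Spec_solve; infer_instance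

-- ===== CLAIM (what is proved, stated in full; the proofs are below) =====
def Claim_equal_solve : Prop := ∀ (N : Int) (Arr : List (Int × Int × Int)), Dom_solve N Arr → Pre_solve N Arr → Spec_solve N Arr (solve N Arr)

-- ===== LEMMAS AND PROOFS =====

-- "sorted ascending" for Python tuple order: no later element is below an earlier one
def RelLe (a b : Int × Int × Int × Int) : Prop := ltB b a = false

lemma ltB_iff (a b : Int × Int × Int × Int) :
    ltB a b = true ↔
      (a.1 < b.1 ∨ (a.1 = b.1 ∧ (a.2.1 < b.2.1 ∨ (a.2.1 = b.2.1 ∧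
        (a.2.2.1 < b.2.2.1 ∨ (a.2.2.1 = b.2.2.1 ∧ a.2.2.2 < b.2.2.2)))))) := by
  simp only [ltB]
  split_ifs <;> simp <;> omega

lemma ltB_irrefl (a : Int × Int × Int × Int) : ltB a a = false := by
  rw [Bool.eq_false_iff, Ne, ltB_iff]; omega

lemma ltB_asymm {a b : Int × Int × Int × Int} (h : ltB a b = true) : ltB b a = false := by
  rw [ltB_iff] at h
  rw [Bool.eq_false_iff, Ne, ltB_iff]
  omega

lemma ltB_antisymm {a b : Int × Int × Int × Int}
    (h1 : ltB a b = false) (h2 : ltB b a = false) : a = b := by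
  rw [Bool.eq_false_iff, Ne, ltB_iff] at h1 h2
  obtain ⟨a1, a2, a3, a4⟩ := a; obtain ⟨b1, b2, b3, b4⟩ := b
  simp only [Prod.mk.injEq]
  simp only at h1 h2
  omega

-- a < c ≤ b gives a < b
lemma ltB_T1 {a c b : Int × Int × Int × Int}
    (h1 : ltB a c = true) (h2 : ltB b c = false) : ltB a b = true := by
  rw [ltB_iff] at h1
  rw [Bool.eq_false_iff, Ne, ltB_iff] at h2
  rw [ltB_iff]
  omega

lemma minOf_mem : ∀ (xs : List (Int × Int × Int × Int)) (x), minOf x xs ∈ x :: xs := by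
  intro xs
  induction xs with
  | nil => intro x; simp [minOf]
  | cons z zs ih =>
    intro x
    by_cases h : ltB z x = true
    · have hrw : minOf x (z :: zs) = minOf z zs := by simp [minOf, List.foldl, h]
      rw [hrw]
      rcases List.mem_cons.mp (ih z) with he | hmem
      · simp [he]
      · simp [hmem]
    · have h' : ltB z x = false := by simpa using h
      have hrw : minOf x (z :: zs) = minOf x zs := by simp [minOf, List.foldl, h']
      rw [hrw]
      rcases List.mem_cons.mp (ih x) with he | hmem
      · simp [he]
      · simp [hmem]

lemma minOf_min : ∀ (xs : List (Int × Int × Int × Int)) (x y),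
    y ∈ x :: xs → ltB y (minOf x xs) = false := by
  intro xs
  induction xs with
  | nil =>
    intro x y hy
    have : y = x := by simpa using hy
    subst this
    simpa [minOf] using ltB_irrefl y
  | cons z zs ih =>
    intro x y hy
    by_cases h : ltB z x = true
    · have hrw : minOf x (z :: zs) = minOf z zs := by simp [minOf, List.foldl, h]
      rw [hrw]
      have hzres : ltB z (minOf z zs) = false := ih z z (by simp)
      have hxres : ltB x (minOf z zs) = false := by
        by_contra hc
        have hc' : ltB x (minOf z zs) = true := by simpa using hc
        have hxz := ltB_T1 hc' hzres
        rw [ltB_asymm h] at hxz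
        exact absurd hxz (by simp)
      rcases List.mem_cons.mp hy with rfl | hy2
      · exact hxres
      rcases List.mem_cons.mp hy2 with rfl | hy3
      · exact hzres
      · exact ih z y (List.mem_cons_of_mem z hy3)
    · have h' : ltB z x = false := by simpa using h
      have hrw : minOf x (z :: zs) = minOf x zs := by simp [minOf, List.foldl, h']
      rw [hrw]
      have hxres : ltB x (minOf x zs) = false := ih x x (by simp)
      have hzres : ltB z (minOf x zs) = false := by
        by_contra hc
        have hc' : ltB z (minOf x zs) = true := by simpa using hc
        have hzx := ltB_T1 hc' hxres
        rw [h'] at hzx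
        exact absurd hzx (by simp)
      rcases List.mem_cons.mp hy with rfl | hy2
      · exact hxres
      rcases List.mem_cons.mp hy2 with rfl | hy3
      · exact hzres
      · exact ih x y (List.mem_cons_of_mem x hy3)

lemma insSorted_perm (t : Int × Int × Int × Int) (l : List (Int × Int × Int × Int)) :
    List.Perm (insSorted t l) (t :: l) := by
  induction l with
  | nil => simp [insSorted]
  | cons x xs ih =>
    simp only [insSorted]
    split_ifs with h
    · exact (ih.cons x).trans (List.Perm.swap t x xs)
    · exact List.Perm.refl _

lemma insSorted_sorted {l : List (Int × Int × Int × Int)} (t : Int × Int × Int × Int)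
    (hs : l.Pairwise RelLe) : (insSorted t l).Pairwise RelLe := by
  induction l with
  | nil => simp [insSorted]
  | cons x xs ih =>
    rw [List.pairwise_cons] at hs
    simp only [insSorted]
    split_ifs with h
    · rw [List.pairwise_cons]
      refine ⟨?_, ih hs.2⟩
      intro y hy
      rcases List.mem_cons.mp ((insSorted_perm t xs).mem_iff.mp hy) with he | hy2
      · rw [he]; unfold RelLe; exact ltB_asymm h
      · exact hs.1 y hy2
    · rw [List.pairwise_cons]
      refine ⟨?_, List.pairwise_cons.mpr hs⟩
      intro y hy
      rcases List.mem_cons.mp hy with rfl | hy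
      · unfold RelLe; simpa using h
      · unfold RelLe
        by_contra hc
        have hc' : ltB y t = true := by simpa using hc
        have h' : ltB x t = false := by simpa using h
        have := ltB_T1 hc' h'
        have hxy := hs.1 y hy
        unfold RelLe at hxy
        rw [hxy] at this
        exact absurd this (by simp)

lemma sorted_head_min {p : Int × Int × Int × Int} {t : List (Int × Int × Int × Int)}
    (hs : (p :: t).Pairwise RelLe) : ∀ y ∈ p :: t, ltB y p = false := by
  intro y hy
  rcases List.mem_cons.mp hy with rfl | hy
  · exact ltB_irrefl y
  · exact (List.pairwise_cons.mp hs).1 y hy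

-- the scanned minimum of any permutation of a sorted list is its head
lemma minOf_of_perm_sorted {x : Int × Int × Int × Int} {xs : List (Int × Int × Int × Int)}
    {p : Int × Int × Int × Int} {t : List (Int × Int × Int × Int)}
    (hperm : List.Perm (p :: t) (x :: xs)) (hs : (p :: t).Pairwise RelLe) :
    minOf x xs = p := by
  have hmem : minOf x xs ∈ p :: t := hperm.mem_iff.mpr (minOf_mem xs x)
  have h1 : ltB (minOf x xs) p = false := sorted_head_min hs _ hmem
  have h2 : ltB p (minOf x xs) = false :=
    minOf_min xs x p (hperm.mem_iff.mp (by simp))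
  exact ltB_antisymm h1 h2

-- core invariant: B's sorted state is a permutation of A's state; the loops stay in lockstep
lemma loop_perm : ∀ (fuel : Nat) (hA hB : List (Int × Int × Int × Int)),
    List.Perm hB hA → hB.Pairwise RelLe →
    List.Perm (loopB fuel hB) (loopA fuel hA) ∧ (loopB fuel hB).Pairwise RelLe := by
  intro fuel
  induction fuel with
  | zero => intro hA hB hp hs; exact ⟨hp, hs⟩
  | succ fuel ih =>
    intro hA hB hp hs
    match hB with
    | [] =>
      have : hA = [] := hp.symm.eq_nil
      subst this
      exact ⟨by simp [loopA, loopB], by simp [loopB]⟩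
    | [t] =>
      have : hA = [t] := List.perm_singleton.mp hp.symm
      subst this
      exact ⟨by simp [loopA, loopB], by simp [loopB]⟩
    | p :: q :: rest =>
      match hA with
      | [] => exact absurd hp.length_eq (by simp)
      | [t] => exact absurd hp.length_eq (by simp)
      | x :: x' :: xs' =>
        have ha : minOf x (x' :: xs') = p := minOf_of_perm_sorted hp hs
        have hp1 : List.Perm (q :: rest) ((x :: x' :: xs').erase p) := by
          have h1 : (p :: q :: rest).erase p = q :: rest := by simp
          have h2 := hp.erase p
          rwa [h1] at h2
        have hs1 : (q :: rest).Pairwise RelLe := (List.pairwise_cons.mp hs).2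
        match he1 : (x :: x' :: xs').erase p with
        | [] =>
          rw [he1] at hp1
          exact absurd hp1.length_eq (by simp)
        | y :: ys =>
          rw [he1] at hp1
          have hb : minOf y ys = q := minOf_of_perm_sorted hp1 hs1
          have hp2 : List.Perm rest ((y :: ys).erase q) := by
            have h1 : (q :: rest).erase q = rest := by simp
            have h2 := hp1.erase q
            rwa [h1] at h2
          have hs2 : rest.Pairwise RelLe := (List.pairwise_cons.mp hs1).2
          have hpnew : List.Perm (insSorted (combine p q) rest)
              (((y :: ys).erase q) ++ [combine p q]) :=
            ((insSorted_perm _ _).trans (hp2.cons _)).trans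
              (List.perm_cons_append_cons _ (by simp))
          have hsnew : (insSorted (combine p q) rest).Pairwise RelLe :=
            insSorted_sorted _ hs2
          have he1' : (x :: x' :: xs').erase (minOf x (x' :: xs')) = y :: ys := by
            rw [ha]; exact he1
          have hstepA : loopA (fuel + 1) (x :: x' :: xs') =
              loopA fuel (((y :: ys).erase (minOf y ys)) ++
                [combine (minOf x (x' :: xs')) (minOf y ys)]) := by
            rw [loopA, he1']
          have hstepB : loopB (fuel + 1) (p :: q :: rest) =
              loopB fuel (insSorted (combine p q) rest) := rfl
          rw [hstepA, hstepB, ha, hb]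
          exact ih _ _ hpnew hsnew

lemma insSorted_length (t : Int × Int × Int × Int) (l : List (Int × Int × Int × Int)) :
    (insSorted t l).length = l.length + 1 := (insSorted_perm t l).length_eq

lemma loopB_length : ∀ (fuel : Nat) (h : List (Int × Int × Int × Int)),
    h ≠ [] → h.length ≤ fuel + 1 → (loopB fuel h).length = 1 := by
  intro fuel
  induction fuel with
  | zero =>
    intro h hne hlen
    match h with
    | [] => exact absurd rfl hne
    | [t] => simp [loopB]
    | a :: b :: t => simp at hlen
  | succ fuel ih =>
    intro h hne hlen
    match h with
    | [] => exact absurd rfl hne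
    | [t] => simp [loopB]
    | p :: q :: rest =>
      have hstep : loopB (fuel + 1) (p :: q :: rest) =
          loopB fuel (insSorted (combine p q) rest) := rfl
      rw [hstep]
      apply ih
      · intro hc
        have := congrArg List.length hc
        simp [insSorted_length] at this
      · rw [insSorted_length]
        simp at hlen
        omega

-- the two build folds produce permuted states, B's sorted
lemma build_perm : ∀ (Arr : List (Int × Int × Int))
    (accA accB : List (Int × Int × Int × Int)),
    List.Perm accB accA → accB.Pairwise RelLe →
    List.Perm (Arr.foldl (fun h p => insSorted (keyOf p) h) accB)
      (Arr.foldl (fun h p => h ++ [keyOf p]) accA) ∧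
    (Arr.foldl (fun h p => insSorted (keyOf p) h) accB).Pairwise RelLe := by
  intro Arr
  induction Arr with
  | nil => intro accA accB hp hs; exact ⟨hp, hs⟩
  | cons p ps ih =>
    intro accA accB hp hs
    simp only [List.foldl]
    apply ih
    · exact ((insSorted_perm _ _).trans (hp.cons _)).trans
        (List.perm_cons_append_cons _ (by simp))
    · exact insSorted_sorted _ hs

lemma buildA_length (Arr : List (Int × Int × Int)) :
    ∀ acc : List (Int × Int × Int × Int),
    (Arr.foldl (fun h p => h ++ [keyOf p]) acc).length = acc.length + Arr.length := by
  induction Arr with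
  | nil => intro acc; simp
  | cons p ps ih =>
    intro acc
    simp only [List.foldl, ih, List.length_append, List.length_cons]
    simp
    omega

-- ===== VERDICT (by name: the statement is the Claim_ definition above) =====
theorem solve_spec : Claim_equal_solve := by
  intro N Arr _hdom hpre
  unfold Spec_solve solve solve_alt
  have hb := build_perm Arr [] [] (List.Perm.refl _) (by simp)
  set heapA := Arr.foldl (fun h p => h ++ [keyOf p]) ([] : List (Int × Int × Int × Int)) with hA
  set ptsB := Arr.foldl (fun h p => insSorted (keyOf p) h) ([] : List (Int × Int × Int × Int)) with hB
  have hlen : ptsB.length = heapA.length := hb.1.length_eq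
  have hlenA : heapA.length = Arr.length := by
    rw [hA, buildA_length Arr []]
    simp
  have hne : ptsB ≠ [] := by
    intro hc
    have h2 := congrArg List.length hc
    rw [hlen, hlenA] at h2
    simp at h2
    exact hpre h2
  have hloop := loop_perm heapA.length heapA ptsB hb.1 hb.2
  have hlen1 : (loopB heapA.length ptsB).length = 1 := by
    rw [← hlen]
    apply loopB_length _ _ hne
    rw [hlen]
    omega
  show (match loopA heapA.length heapA with
        | t :: _ => (t.2.2.1, t.2.2.2)
        | [] => ((0 : Int), (0 : Int))) =
       (match loopB ptsB.length ptsB with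
        | t :: _ => (t.2.2.1, t.2.2.2)
        | [] => ((0 : Int), (0 : Int)))
  rw [hlen]
  match hres : loopB heapA.length ptsB with
  | [] => rw [hres] at hlen1; simp at hlen1
  | t :: ts =>
    rw [hres] at hlen1 hloop
    have hts : ts = [] := by simpa using hlen1
    subst hts
    have hA1 : loopA heapA.length heapA = [t] := by
      have h2 := hloop.1.symm
      rwa [List.perm_singleton] at h2
    rw [hA1]
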